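-- pv_equiv track=rewrite | github.com/sreekanth-anubolu/HackerRank | Algorithms/strings/mars_exploration.py | marsExploration
-- ===== SOURCE A (Python) =====
-- def marsExploration(received_sos_message):
--     sos_message_reference = "SOS"
--     _index_jump = len(sos_message_reference)
--     _count = len(received_sos_message) / _index_jump
--     _start = 0
--     _end = _index_jump
--
--     _corrupted_count = 0
--     for n in range(int(_count)):
--         if n > 0:
--             _start = _start + _index_jump
--             _end = _end + _index_jump
--
--         _msg = received_sos_message[_start: _end]
--         if _msg[0] != sos_message_reference[0]:
--                 _corrupted_count += 1
--
--         if _msg[1] != sos_message_reference[1]: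
--                 _corrupted_count += 1
--
--         if _msg[2] != sos_message_reference[2]:
--                 _corrupted_count += 1
--
--     return _corrupted_count
-- ===== SOURCE B (Python) =====
-- def marsExploration(received_sos_message):
--     # Column-wise strategy: truncate to whole SOS blocks, extract the three
--     # "columns" with stride slices, count the CORRECT characters in each column
--     # ('S','O','S' respectively), and return total length minus matches.
--     m = 3 * (len(received_sos_message) // 3)
--     s = received_sos_message[:m]
--     matches = s[0::3].count('S') + s[1::3].count('O') + s[2::3].count('S')
--     return m - matches
-- ===== Notes on version B (the rewrite author's own statement) =====
-- stated objective: faster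
-- what changed: Replaces A's row-wise block loop (manual start/end window arithmetic, a 3-char slice and three index checks per block) with a column-wise strategy: three stride slices s[0::3]/s[1::3]/s[2::3], counting the CORRECT characters per column with str.count, and returning length-of-blocks minus matches.
import Mathlib
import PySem

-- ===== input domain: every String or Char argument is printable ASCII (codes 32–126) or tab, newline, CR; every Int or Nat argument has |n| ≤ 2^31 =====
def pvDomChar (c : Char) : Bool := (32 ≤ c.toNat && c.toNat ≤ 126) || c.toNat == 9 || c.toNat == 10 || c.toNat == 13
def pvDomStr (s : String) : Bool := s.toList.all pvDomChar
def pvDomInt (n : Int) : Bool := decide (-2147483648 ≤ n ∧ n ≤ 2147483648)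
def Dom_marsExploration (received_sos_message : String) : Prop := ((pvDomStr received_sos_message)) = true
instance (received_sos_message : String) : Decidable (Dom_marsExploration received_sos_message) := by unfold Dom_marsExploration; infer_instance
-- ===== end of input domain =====

-- B replaces A's row-wise block loop with a column-wise pass: three stride slices, counting correct characters per column, and complementing; measured faster by a constant factor (C-level count in Python).


-- ===== PORT A =====
-- one loop iteration: shift the [start,end) window when n > 0, slice, three index comparisons
def marsStep (l : List Char) (acc : Int × Int × Int) (n : Int) : Int × Int × Int :=
  let start := if n > 0 then acc.1 + 3 else acc.1
  let stop  := if n > 0 then acc.2.1 + 3 else acc.2.1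
  let msg := PySem.List.slice l (some start) (some stop)
  let c := acc.2.2
  let c := if PySem.List.pyGet? msg 0 ≠ PySem.List.pyGet? "SOS".toList 0 then c + 1 else c
  let c := if PySem.List.pyGet? msg 1 ≠ PySem.List.pyGet? "SOS".toList 1 then c + 1 else c
  let c := if PySem.List.pyGet? msg 2 ≠ PySem.List.pyGet? "SOS".toList 2 then c + 1 else c
  (start, stop, c)

def marsExploration (received_sos_message : String) : Int :=
  -- int(len(s)/3): len is nonnegative, so float division + int() equals floor division
  let count := PySem.Int.floordiv (received_sos_message.toList.length : Int) 3
  ((PySem.List.pyRange 0 count 1).foldl (marsStep received_sos_message.toList) (0, 3, 0)).2.2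

-- ===== PORT B =====
-- Source B: m = 3*(len//3); s = msg[:m]; matches = s[0::3].count('S') + s[1::3].count('O') + s[2::3].count('S'); return m - matches
def marsExploration_alt (received_sos_message : String) : Int :=
  let l := received_sos_message.toList
  let m := 3 * (l.length / 3)
  let s := PySem.List.slice l none (some (m : Int))
  let matched := PySem.List.count ((PySem.List.slice? s (some 0) none 3).getD []) 'S'
              + PySem.List.count ((PySem.List.slice? s (some 1) none 3).getD []) 'O'
              + PySem.List.count ((PySem.List.slice? s (some 2) none 3).getD []) 'S'
  (m : Int) - (matched : Int)

-- ===== PRECONDITION & SPEC =====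
def Spec_marsExploration (received_sos_message : String) (out : Int) : Prop := out = marsExploration_alt received_sos_message
instance (received_sos_message : String) (out : Int) : Decidable (Spec_marsExploration received_sos_message out) := by unfold Spec_marsExploration; infer_instance

-- ===== CLAIM (what is proved, stated in full; the proofs are below) =====
def Claim_equal_marsExploration : Prop := ∀ (received_sos_message : String), Dom_marsExploration received_sos_message → Spec_marsExploration received_sos_message (marsExploration received_sos_message)

-- ===== LEMMAS AND PROOFS =====

-- common reference: mismatches over the first k blocks of 3
def chunkW (a b c : Char) : Int :=
  (if a ≠ 'S' then 1 else 0) + (if b ≠ 'O' then 1 else 0) + (if c ≠ 'S' then 1 else 0)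

def F : List Char → Nat → Int
  | _, 0 => 0
  | a :: b :: c :: t, (k+1) => chunkW a b c + F t k
  | _, _ => 0

lemma pyGet3_0 (a b ch : Char) : PySem.List.pyGet? [a,b,ch] (0:Int) = some a := by
  simp [PySem.List.pyGet?, PySem.List.pyIdx?]
lemma pyGet3_1 (a b ch : Char) : PySem.List.pyGet? [a,b,ch] (1:Int) = some b := by
  simp [PySem.List.pyGet?, PySem.List.pyIdx?]
lemma pyGet3_2 (a b ch : Char) : PySem.List.pyGet? [a,b,ch] (2:Int) = some ch := by
  simp [PySem.List.pyGet?, PySem.List.pyIdx?]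
lemma pyGetS0 : PySem.List.pyGet? "SOS".toList (0:Int) = some 'S' := by decide
lemma pyGetS1 : PySem.List.pyGet? "SOS".toList (1:Int) = some 'O' := by decide
lemma pyGetS2 : PySem.List.pyGet? "SOS".toList (2:Int) = some 'S' := by decide

lemma drop_three (l : List Char) (j : Nat) (hlen : j + 3 ≤ l.length) :
    ∃ a b ch t, l.drop j = a :: b :: ch :: t := by
  have hlen' : (l.drop j).length ≥ 3 := by rw [List.length_drop]; omega
  match hd : l.drop j with
  | a :: b :: ch :: t => exact ⟨a, b, ch, t, rfl⟩
  | [] => rw [hd] at hlen'; simp at hlen'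
  | [x] => rw [hd] at hlen'; simp at hlen'
  | [x, y] => rw [hd] at hlen'; simp at hlen'

lemma slice_chunk (l : List Char) (j : Nat) (a b c : Char) (t : List Char)
    (h : l.drop j = a :: b :: c :: t) :
    PySem.List.slice l (some (j:Int)) (some ((j:Int) + 3)) = [a, b, c] := by
  have h3 : ((j:Int) + 3) = ((j:Int) + ((3:Nat):Int)) := by push_cast; ring
  rw [h3, PySem.List.slice_natCast_add, h]
  rfl

lemma marsStep_of_slice (l : List Char) (st sp c n : Int) (a b ch : Char)
    (hsl : PySem.List.slice l (some (if n > 0 then st + 3 else st))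
        (some (if n > 0 then sp + 3 else sp)) = [a, b, ch]) :
    marsStep l (st, sp, c) n =
      ((if n > 0 then st + 3 else st), (if n > 0 then sp + 3 else sp), c + chunkW a b ch) := by
  simp only [marsStep, hsl, pyGet3_0, pyGet3_1, pyGet3_2, pyGetS0, pyGetS1, pyGetS2,
    ne_eq, Option.some.injEq, chunkW]
  split_ifs <;> simp_all <;> ring

-- the loop over range(m+1, m+1+k) starting from the window [3m, 3m+3)
lemma loopA (l : List Char) :
    ∀ (k m : Nat) (c : Int), 3*m + 3 + 3*k ≤ l.length →
      ((PySem.List.pyRange ((m:Int)+1) ((m:Int)+1+(k:Int)) 1).foldl (marsStep l)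
          ((3*(m:Int)), (3*(m:Int))+3, c)).2.2
        = c + F (l.drop (3*m + 3)) k := by
  intro k
  induction k with
  | zero =>
    intro m c _
    rw [PySem.List.pyRange_one_eq_nil (by omega)]
    simp [F]
  | succ k ih =>
    intro m c hlen
    have hlt : ((m:Int)+1) < ((m:Int)+1+((k:Nat)+1:Nat)) := by push_cast; omega
    rw [PySem.List.pyRange_one_cons hlt]
    obtain ⟨a, b, ch, t, h⟩ := drop_three l (3*m + 3) (by omega)
    have hn : ((m:Int)+1) > 0 := by positivity
    have hsl : PySem.List.slice l (some (if ((m:Int)+1) > 0 then 3*(m:Int) + 3 else 3*(m:Int)))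
        (some (if ((m:Int)+1) > 0 then (3*(m:Int)+3) + 3 else 3*(m:Int)+3)) = [a, b, ch] := by
      rw [if_pos hn, if_pos hn]
      have hc : (3*(m:Int) + 3) = ((3*m+3 : Nat) : Int) := by push_cast; ring
      rw [hc]
      exact slice_chunk l (3*m+3) a b ch t h
    rw [List.foldl_cons, marsStep_of_slice l (3*(m:Int)) (3*(m:Int)+3) c ((m:Int)+1) a b ch hsl]
    rw [if_pos hn, if_pos hn]
    have key := ih (m+1) (c + chunkW a b ch) (by omega)
    have e1 : (((m+1:Nat)):Int) = (m:Int)+1 := by push_cast; ring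
    rw [e1] at key
    have e2 : ((m:Int)+1+((k:Nat)+1:Nat)) = ((m:Int)+1)+1+(k:Int) := by push_cast; ring
    have e3 : 3*((m:Int)+1) = 3*(m:Int)+3 := by ring
    rw [e3] at key
    rw [e2, key]
    rw [h, F]
    have hdt : l.drop (3*(m+1) + 3) = t := by
      have e5 : 3*(m+1) + 3 = (3*m+3) + 3 := by ring
      rw [e5, ← List.drop_drop, h]; rfl
    rw [hdt]
    ring

lemma A_eq_F (s : String) : marsExploration s = F s.toList (s.toList.length / 3) := by
  simp only [marsExploration]
  generalize s.toList = l
  have hc : PySem.Int.floordiv (l.length : Int) 3 = ((l.length / 3 : Nat) : Int) := by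
    exact_mod_cast PySem.Int.floordiv_natCast l.length 3
  rw [hc]
  match hkk : l.length / 3 with
  | 0 =>
    rw [show ((0:Nat):Int) = 0 by norm_num, PySem.List.pyRange_one_eq_nil (by norm_num)]
    simp [F]
  | kk + 1 =>
    have hlen : 3 * (kk+1) ≤ l.length := by omega
    have h0 : ((0:Int) < ((kk+1:Nat):Int)) := by positivity
    rw [PySem.List.pyRange_one_cons h0]
    obtain ⟨a, b, ch, t, h⟩ := drop_three l 0 (by omega)
    simp only [List.drop_zero] at h
    have hsl : PySem.List.slice l (some (if (0:Int) > 0 then (0:Int) + 3 else 0))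
        (some (if (0:Int) > 0 then (3:Int) + 3 else 3)) = [a, b, ch] := by
      norm_num
      have := slice_chunk l 0 a b ch t (by simpa using h)
      simpa using this
    rw [List.foldl_cons, marsStep_of_slice l 0 3 0 0 a b ch hsl]
    norm_num
    have key := loopA l kk 0 (chunkW a b ch) (by omega)
    norm_num at key
    rw [show ((kk:Int)+1) = 1+(kk:Int) by ring]
    rw [key]
    rw [h, F]
    have ht : (a :: b :: ch :: t).drop 3 = t := rfl
    rw [ht]

-- proof-side view of a stride-3 slice: take every third element
def everyNth3 {α : Type} : List α → List α
  | [] => []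
  | x :: xs => x :: everyNth3 (xs.drop 2)
termination_by l => l.length
decreasing_by simp [List.length_drop]

lemma everyNth3_nil {α : Type} : everyNth3 ([] : List α) = [] := by simp [everyNth3]
lemma everyNth3_cons {α : Type} (x : α) (xs : List α) :
    everyNth3 (x :: xs) = x :: everyNth3 (xs.drop 2) := by simp [everyNth3]

lemma everyNth3_eq_filterMap_aux {α : Type} : ∀ (n : Nat) (l : List α), l.length ≤ n →
    everyNth3 l = (List.range ((l.length + 2) / 3)).filterMap (fun k => l[3*k]?) := by
  intro n
  induction n with
  | zero =>
    intro l hl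
    have : l = [] := List.eq_nil_of_length_eq_zero (by omega)
    subst this; simp [everyNth3_nil]
  | succ n ihn =>
    intro l hl
    match l with
    | [] => simp [everyNth3_nil]
    | x :: xs =>
    have ih := ihn (xs.drop 2) (by simp [List.length_drop]; simp at hl; omega)
    have hn : ((x :: xs).length + 2) / 3 = ((xs.drop 2).length + 2) / 3 + 1 := by
      simp [List.length_drop]; omega
    rw [everyNth3_cons, ih, hn, List.range_succ_eq_map, List.filterMap_cons]
    simp only [Nat.mul_zero, List.getElem?_cons_zero, List.filterMap_map]
    congr 1
    apply List.filterMap_congr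
    intro k _
    have : 3 * Nat.succ k = (2 + 3*k) + 1 := by omega
    simp only [Function.comp_apply, this, List.getElem?_cons_succ, List.getElem?_drop]

lemma everyNth3_eq_filterMap {α : Type} (l : List α) :
    everyNth3 l = (List.range ((l.length + 2) / 3)).filterMap (fun k => l[3*k]?) :=
  everyNth3_eq_filterMap_aux l.length l le_rfl

lemma sliceIndices_stride3 (n j : Nat) :
    PySem.List.sliceIndices n (some (j:Int)) none 3 = (min (j:Int) n, (n:Int), 3) := by
  simp [PySem.List.sliceIndices]

lemma slice?_stride3 {α : Type} (l : List α) (j : Nat) :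
    PySem.List.slice? l (some (j:Int)) none 3 = some (everyNth3 (l.drop j)) := by
  have h30 : ¬((3:Int) = 0) := by norm_num
  have h03 : (0:Int) < 3 := by norm_num
  simp only [PySem.List.slice?, sliceIndices_stride3, if_neg h30, if_pos h03]
  by_cases hj : j < l.length
  · have hmin : min ((j:Int)) ((l.length:Int)) = (j:Int) := by omega
    rw [hmin, if_pos (by exact_mod_cast hj)]
    have hc : (((l.length:Int) - (j:Int) + 3 - 1) / 3).toNat = ((l.length - j + 2) / 3) := by
      have h1 : ((l.length:Int) - (j:Int) + 3 - 1) = ((l.length - j + 2 : Nat) : Int) := by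
        push_cast; omega
      rw [h1, show ((3:Int)) = ((3:Nat):Int) from rfl, ← Int.natCast_div, Int.toNat_natCast]
    rw [hc, everyNth3_eq_filterMap, List.length_drop]
    refine congrArg some (List.filterMap_congr ?_)
    intro k _
    have h2 : ((j:Int) + 3 * (k:Int)).toNat = j + 3 * k := by omega
    rw [h2, ← List.getElem?_drop]
  · have hmin : min ((j:Int)) ((l.length:Int)) = (l.length:Int) := by omega
    rw [hmin, if_neg (by omega)]
    rw [List.drop_of_length_le (by omega), everyNth3_nil]
    rfl

-- per-column matches over a string of exactly 3*k characters
lemma matches_blocks : ∀ (k : Nat) (l : List Char), l.length = 3 * k →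
    ((everyNth3 l).count 'S' : Int) + ((everyNth3 (l.drop 1)).count 'O' : Int)
      + ((everyNth3 (l.drop 2)).count 'S' : Int) = 3 * k - F l k := by
  intro k
  induction k with
  | zero =>
    intro l hl
    have : l = [] := List.eq_nil_of_length_eq_zero (by omega)
    subst this; simp [everyNth3_nil, F]
  | succ k ih =>
    intro l hl
    obtain ⟨a, b, c, t, h⟩ := drop_three l 0 (by omega)
    simp only [List.drop_zero] at h
    subst h
    have ht : t.length = 3 * k := by simp at hl; omega
    have e0 : everyNth3 (a :: b :: c :: t) = a :: everyNth3 t := by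
      rw [everyNth3_cons]; rfl
    have e1 : everyNth3 ((a :: b :: c :: t).drop 1) = b :: everyNth3 (t.drop 1) := by
      rw [List.drop_one, List.tail_cons, everyNth3_cons]; rfl
    have e2 : everyNth3 ((a :: b :: c :: t).drop 2) = c :: everyNth3 (t.drop 2) := by
      rw [show (a :: b :: c :: t).drop 2 = c :: t from rfl, everyNth3_cons]
    rw [e0, e1, e2, F]
    simp only [List.count_cons]
    have key := ih t ht
    simp only [List.drop_one] at key
    push_cast at key ⊢
    by_cases h1 : a = 'S' <;> by_cases h2 : b = 'O' <;> by_cases h3 : c = 'S' <;>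
      · simp [chunkW, h1, h2, h3]
        omega

lemma F_zero (l : List Char) : F l 0 = 0 := by
  match l with
  | [] => rfl
  | [a] => rfl
  | [a, b] => rfl
  | a :: b :: c :: t => rfl

lemma F_take : ∀ (k : Nat) (l : List Char), F (l.take (3*k)) k = F l k := by
  intro k
  induction k with
  | zero => intro l; rw [F_zero, F_zero]
  | succ k ih =>
    intro l
    match l with
    | [] => rfl
    | [x] => rfl
    | [x, y] => rfl
    | a :: b :: c :: t =>
      have : (a :: b :: c :: t).take (3*(k+1)) = a :: b :: c :: t.take (3*k) := by
        rw [show 3*(k+1) = (3*k) + 1 + 1 + 1 by ring]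
        rfl
      rw [this, F, F, ih]

lemma B_eq_F (s : String) : marsExploration_alt s = F s.toList (s.toList.length / 3) := by
  simp only [marsExploration_alt]
  generalize s.toList = l
  set k := l.length / 3 with hk
  have hm : 3 * k ≤ l.length := by omega
  have hs : PySem.List.slice l none (some ((3*k : Nat) : Int)) = l.take (3*k) :=
    PySem.List.slice_to_natCast l (3*k)
  rw [show ((3 * k : Nat) : Int) = ((3*k : Nat) : Int) from rfl] at hs
  have hcast : ((3 * (l.length / 3) : Nat) : Int) = (((3*k : Nat)) : Int) := by rw [hk]
  rw [hcast, hs]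
  have hlen : (l.take (3*k)).length = 3 * k := by simp; omega
  rw [PySem.List.count_eq, PySem.List.count_eq, PySem.List.count_eq]
  have s0 := slice?_stride3 (l.take (3*k)) 0
  have s1 := slice?_stride3 (l.take (3*k)) 1
  have s2 := slice?_stride3 (l.take (3*k)) 2
  push_cast at s0 s1 s2
  rw [s0, s1, s2]
  simp only [Option.getD_some, List.drop_zero]
  have hm2 := matches_blocks k (l.take (3*k)) hlen
  have hFt : F (l.take (3*k)) k = F l k := F_take k l
  push_cast
  omega

-- ===== VERDICT (by name: the statement is the Claim_ definition above) =====
theorem marsExploration_spec : Claim_equal_marsExploration := by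
  intro s _
  unfold Spec_marsExploration
  rw [A_eq_F, B_eq_F]
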